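-- pv_equiv track=rewrite | github.com/thomascrelier/Budgetapp-new | backend/app/routers/analytics.py | is_utility_category
-- ===== SOURCE A (Python) =====
-- UTILITY_CATEGORIES = ["water", "tax", "energy", "internet", "gas", "electricity", "hydro", "property tax"]
--
-- def is_utility_category(category: str) -> str:
--     """Check if a category is a utility and normalize it."""
--     if not category:
--         return None
--     cat_lower = category.lower()
--     for util in UTILITY_CATEGORIES:
--         if util in cat_lower:
--             # Normalize to standard names
--             if "water" in cat_lower:
--                 return "Water"
--             if "tax" in cat_lower:
--                 return "Property Tax"
--             if "energy" in cat_lower or "electricity" in cat_lower or "hydro" in cat_lower: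
--                 return "Energy"
--             if "internet" in cat_lower:
--                 return "Internet"
--             if "gas" in cat_lower:
--                 return "Gas"
--     return None
-- ===== SOURCE B (Python) =====
-- # Data-driven: an ordered rule table scanned once, instead of A's gating loop + if-cascade.
-- UTILITY_RULES = [
--     ("water", "Water"),
--     ("tax", "Property Tax"),
--     ("energy", "Energy"),
--     ("electricity", "Energy"),
--     ("hydro", "Energy"),
--     ("internet", "Internet"),
--     ("gas", "Gas"),
-- ]
--
-- def is_utility_category(category: str) -> str:
--     """Check if a category is a utility and normalize it."""
--     if not category:
--         return None
--     cat = category.lower()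
--     return next((name for kw, name in UTILITY_RULES if kw in cat), None)
-- ===== Notes on version B (the rewrite author's own statement) =====
-- stated objective: simpler
-- what changed: Replaced A's outer gating loop over UTILITY_CATEGORIES plus hard-coded if-cascade by a single scan of an ordered (keyword -> normalized name) rule table, returning the first rule whose keyword occurs in the lowercased input; the flattened rule order preserves A's branch priority exactly.
import Mathlib
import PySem

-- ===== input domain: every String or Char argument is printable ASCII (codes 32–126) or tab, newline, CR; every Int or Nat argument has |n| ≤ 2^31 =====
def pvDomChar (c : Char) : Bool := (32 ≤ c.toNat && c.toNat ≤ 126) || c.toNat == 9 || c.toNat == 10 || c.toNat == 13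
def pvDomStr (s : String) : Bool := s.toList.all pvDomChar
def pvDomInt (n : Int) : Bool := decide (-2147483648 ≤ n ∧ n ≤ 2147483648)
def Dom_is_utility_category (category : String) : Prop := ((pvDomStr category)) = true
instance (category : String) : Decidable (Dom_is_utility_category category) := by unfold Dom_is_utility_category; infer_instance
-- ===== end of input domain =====

-- B replaces A's gating loop + hard-coded if-cascade by one scan of an ordered keyword→name rule table (simpler).

-- ===== PORT A =====
def UTILITY_CATEGORIES : List String :=
  ["water", "tax", "energy", "internet", "gas", "electricity", "hydro", "property tax"]

-- the 'for util in UTILITY_CATEGORIES' loop with its early returns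
def utilLoop (cat : String) : List String → Option String
  | [] => none
  | util :: rest =>
    if PySem.Str.isIn util cat then
      if PySem.Str.isIn "water" cat then some "Water"
      else if PySem.Str.isIn "tax" cat then some "Property Tax"
      else if PySem.Str.isIn "energy" cat || PySem.Str.isIn "electricity" cat || PySem.Str.isIn "hydro" cat then some "Energy"
      else if PySem.Str.isIn "internet" cat then some "Internet"
      else if PySem.Str.isIn "gas" cat then some "Gas"
      else utilLoop cat rest
    else utilLoop cat rest

def is_utility_category (category : String) : Option String :=
  if category = "" then none
  else
    let cat_lower := PySem.Str.lower category
    utilLoop cat_lower UTILITY_CATEGORIES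

-- ===== PORT B =====
def UTILITY_RULES : List (String × String) :=
  [("water", "Water"), ("tax", "Property Tax"), ("energy", "Energy"),
   ("electricity", "Energy"), ("hydro", "Energy"), ("internet", "Internet"),
   ("gas", "Gas")]

-- next((name for kw, name in UTILITY_RULES if kw in cat), None)
def ruleScan (cat : String) : List (String × String) → Option String
  | [] => none
  | (kw, name) :: rest => if PySem.Str.isIn kw cat then some name else ruleScan cat rest

def is_utility_category_alt (category : String) : Option String :=
  if category = "" then none
  else
    let cat := PySem.Str.lower category
    ruleScan cat UTILITY_RULES

-- ===== PRECONDITION & SPEC =====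
def Spec_is_utility_category (category : String) (out : Option String) : Prop := out = is_utility_category_alt category
instance (category : String) (out : Option String) : Decidable (Spec_is_utility_category category out) := by unfold Spec_is_utility_category; infer_instance

-- ===== CLAIM (what is proved, stated in full; the proofs are below) =====
def Claim_equal_is_utility_category : Prop := ∀ (category : String), Dom_is_utility_category category → Spec_is_utility_category category (is_utility_category category)

-- ===== LEMMAS AND PROOFS =====

-- A's unrolled gating loop and B's rule-table scan agree on any string (boolean case analysis)
theorem utilLoop_eq_ruleScan (cat : String) :
    utilLoop cat UTILITY_CATEGORIES = ruleScan cat UTILITY_RULES := by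
  by_cases hw : PySem.Chars.isIn ['w','a','t','e','r'] cat.toList = true
  · simp [UTILITY_CATEGORIES, UTILITY_RULES, utilLoop, ruleScan, hw]
  · by_cases ht : PySem.Chars.isIn ['t','a','x'] cat.toList = true
    · simp [UTILITY_CATEGORIES, UTILITY_RULES, utilLoop, ruleScan, hw, ht]
    · by_cases he : PySem.Chars.isIn ['e','n','e','r','g','y'] cat.toList = true
      · simp [UTILITY_CATEGORIES, UTILITY_RULES, utilLoop, ruleScan, hw, ht, he]
      · by_cases hel : PySem.Chars.isIn ['e','l','e','c','t','r','i','c','i','t','y'] cat.toList = true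
        · simp [UTILITY_CATEGORIES, UTILITY_RULES, utilLoop, ruleScan, hw, ht, he, hel]
        · by_cases hh : PySem.Chars.isIn ['h','y','d','r','o'] cat.toList = true
          · simp [UTILITY_CATEGORIES, UTILITY_RULES, utilLoop, ruleScan, hw, ht, he, hel, hh]
          · by_cases hi : PySem.Chars.isIn ['i','n','t','e','r','n','e','t'] cat.toList = true
            · simp [UTILITY_CATEGORIES, UTILITY_RULES, utilLoop, ruleScan, hw, ht, he, hel, hh, hi]
            · by_cases hg : PySem.Chars.isIn ['g','a','s'] cat.toList = true
              · simp [UTILITY_CATEGORIES, UTILITY_RULES, utilLoop, ruleScan, hw, ht, he, hel, hh, hi, hg]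
              · simp [UTILITY_CATEGORIES, UTILITY_RULES, utilLoop, ruleScan, hw, ht, he, hel, hh, hi, hg]

-- ===== VERDICT (by name: the statement is the Claim_ definition above) =====
theorem is_utility_category_spec : Claim_equal_is_utility_category := by
  intro category _
  unfold Spec_is_utility_category is_utility_category is_utility_category_alt
  by_cases h : category = "" <;> simp [h, utilLoop_eq_ruleScan]
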